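-- pv_equiv track=rewrite | github.com/Gansputra/diagnosa_penyakit | conditional.py | diagnosa
-- ===== SOURCE A (Python) =====
-- def diagnosa(gejala_user):
--     hasil = []
--
--     if all(g in gejala_user for g in ["Demam tinggi", "Batuk kering", "Sesak napas"]):
--         hasil.append("COVID-19 (Segera lakukan tes PCR dan isolasi mandiri)")
--
--     if all(g in gejala_user for g in ["Demam tinggi", "Sakit kepala", "Nyeri otot"]):
--         hasil.append("Demam Berdarah (DBD) - Periksa kadar trombosit segera")
--
--     if all(g in gejala_user for g in ["Pilek", "Sakit tenggorokan", "Batuk kering"]):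
--         hasil.append("Flu / Influenza (Disarankan istirahat dan minum vitamin)")
--
--     if all(g in gejala_user for g in ["Sakit tenggorokan", "Demam ringan"]):
--         hasil.append("Radang Tenggorokan (Hindari makanan berminyak)")
--
--     if all(g in gejala_user for g in ["Nyeri otot", "Kelelahan", "Demam ringan"]):
--         hasil.append("Kelelahan Fisik / Influenza Ringan")
--
--     if not hasil and gejala_user:
--         if "Sesak napas" in gejala_user:
--             hasil.append("Gangguan Pernapasan (Segera hubungi layanan kesehatan)")
--
--         if "Demam tinggi" in gejala_user:
--             hasil.append("Demam Tinggi (Gunakan kompres dingin dan paracetamol)")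
--
--         if "Sakit kepala" in gejala_user:
--             if "Kelelahan" in gejala_user:
--                 hasil.append("Sakit Kepala Akibat Kelelahan / Stress")
--             else:
--                 hasil.append("Migrain atau Sakit Kepala Biasa")
--
--         if "Nyeri otot" in gejala_user:
--             hasil.append("Myalgia (Nyeri Otot) - Butuh relaksasi")
--
--         if "Sakit tenggorokan" in gejala_user:
--             hasil.append("Iritasi Tenggorokan / Gejala Awal Radang")
--
--         if "Pilek" in gejala_user:
--             hasil.append("Rhinitis / Pilek Biasa")
--
--         if "Kelelahan" in gejala_user and not any("Sakit kepala" in gejala_user for g in ["Sakit kepala"]):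
--             hasil.append("Kelelahan Akut - Disarankan istirahat total")
--
--         if "Demam ringan" in gejala_user:
--             hasil.append("Gejala Meriang / Demam Ringan")
--
--         if "Batuk kering" in gejala_user:
--             hasil.append("Batuk Kering (Kemungkinan iritasi tenggorokan)")
--
--     if not hasil and gejala_user:
--         hasil.append("Gejala tidak spesifik. Hubungi tenaga medis untuk diagnosa lebih lanjut.")
--
--     return hasil
-- ===== SOURCE B (Python) =====
-- _SYMPTOMS = ["Demam tinggi", "Batuk kering", "Sesak napas", "Sakit kepala",
--              "Nyeri otot", "Pilek", "Sakit tenggorokan", "Demam ringan", "Kelelahan"]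
--
--
-- def _req(names):
--     return sum(1 << _SYMPTOMS.index(n) for n in names)
--
--
-- _COMBO = [
--     (_req(["Demam tinggi", "Batuk kering", "Sesak napas"]),
--      "COVID-19 (Segera lakukan tes PCR dan isolasi mandiri)"),
--     (_req(["Demam tinggi", "Sakit kepala", "Nyeri otot"]),
--      "Demam Berdarah (DBD) - Periksa kadar trombosit segera"),
--     (_req(["Pilek", "Sakit tenggorokan", "Batuk kering"]),
--      "Flu / Influenza (Disarankan istirahat dan minum vitamin)"),
--     (_req(["Sakit tenggorokan", "Demam ringan"]),
--      "Radang Tenggorokan (Hindari makanan berminyak)"),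
--     (_req(["Nyeri otot", "Kelelahan", "Demam ringan"]),
--      "Kelelahan Fisik / Influenza Ringan"),
-- ]
--
-- _FALLBACK = [
--     (_req(["Sesak napas"]), 0, "Gangguan Pernapasan (Segera hubungi layanan kesehatan)"),
--     (_req(["Demam tinggi"]), 0, "Demam Tinggi (Gunakan kompres dingin dan paracetamol)"),
--     (_req(["Sakit kepala", "Kelelahan"]), 0, "Sakit Kepala Akibat Kelelahan / Stress"),
--     (_req(["Sakit kepala"]), _req(["Kelelahan"]), "Migrain atau Sakit Kepala Biasa"),
--     (_req(["Nyeri otot"]), 0, "Myalgia (Nyeri Otot) - Butuh relaksasi"),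
--     (_req(["Sakit tenggorokan"]), 0, "Iritasi Tenggorokan / Gejala Awal Radang"),
--     (_req(["Pilek"]), 0, "Rhinitis / Pilek Biasa"),
--     (_req(["Kelelahan"]), _req(["Sakit kepala"]), "Kelelahan Akut - Disarankan istirahat total"),
--     (_req(["Demam ringan"]), 0, "Gejala Meriang / Demam Ringan"),
--     (_req(["Batuk kering"]), 0, "Batuk Kering (Kemungkinan iritasi tenggorokan)"),
-- ]
--
--
-- def _entry(mask):
--     out = [msg for req, msg in _COMBO if mask & req == req]
--     if not out:
--         out = [msg for req, forb, msg in _FALLBACK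
--                if mask & req == req and not (mask & forb)]
--     if not out:
--         out = ["Gejala tidak spesifik. Hubungi tenaga medis untuk diagnosa lebih lanjut."]
--     return out
--
--
-- # All 512 possible answers, precomputed once from the symptom bitmask.
-- _TABLE = [_entry(m) for m in range(512)]
--
--
-- def diagnosa(gejala_user):
--     if not gejala_user:
--         return []
--     mask = 0
--     for g in gejala_user:
--         if g in _SYMPTOMS:
--             mask |= 1 << _SYMPTOMS.index(g)
--     return list(_TABLE[mask])
-- ===== Notes on version B (the rewrite author's own statement) =====
-- stated objective: alternative
-- what changed: B precomputes a 512-entry answer table indexed by a 9-bit symptom bitmask (built once from declarative rule masks); each call just folds the input into a bitmask in one pass and returns the table entry, instead of re-evaluating A's if/append rule chain with repeated membership scans per call.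
import Mathlib
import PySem

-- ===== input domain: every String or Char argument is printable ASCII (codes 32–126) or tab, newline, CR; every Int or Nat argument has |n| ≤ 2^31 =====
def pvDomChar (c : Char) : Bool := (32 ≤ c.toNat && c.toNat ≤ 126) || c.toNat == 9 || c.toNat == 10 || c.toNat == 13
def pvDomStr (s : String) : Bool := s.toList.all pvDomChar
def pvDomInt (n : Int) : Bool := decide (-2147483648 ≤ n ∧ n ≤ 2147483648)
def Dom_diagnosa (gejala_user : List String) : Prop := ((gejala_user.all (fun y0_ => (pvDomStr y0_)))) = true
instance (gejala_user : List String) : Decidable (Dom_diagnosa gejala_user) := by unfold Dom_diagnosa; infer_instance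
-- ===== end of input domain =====

-- B replaces A's per-call if/append rule chain by a precomputed 512-entry table indexed by a
-- 9-bit symptom bitmask; equal return value on every input (no argument is mutated by either).

-- ===== PORT A =====
-- transliteration of A's if/append chain; the repeated 'if <cond>: hasil.append(<msg>)'
-- idiom is factored as appendIf / appendIf2 (the nested if/else).
def appendIf (c : Bool) (m : String) (hasil : List String) : List String :=
  if c then hasil ++ [m] else hasil

def appendIf2 (c c' : Bool) (m1 m2 : String) (hasil : List String) : List String :=
  if c then (if c' then hasil ++ [m1] else hasil ++ [m2]) else hasil

def comboChecks (gejala_user : List String) (hasil : List String) : List String :=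
  let hasil := appendIf (["Demam tinggi", "Batuk kering", "Sesak napas"].all (fun g => gejala_user.contains g))
    "COVID-19 (Segera lakukan tes PCR dan isolasi mandiri)" hasil
  let hasil := appendIf (["Demam tinggi", "Sakit kepala", "Nyeri otot"].all (fun g => gejala_user.contains g))
    "Demam Berdarah (DBD) - Periksa kadar trombosit segera" hasil
  let hasil := appendIf (["Pilek", "Sakit tenggorokan", "Batuk kering"].all (fun g => gejala_user.contains g))
    "Flu / Influenza (Disarankan istirahat dan minum vitamin)" hasil
  let hasil := appendIf (["Sakit tenggorokan", "Demam ringan"].all (fun g => gejala_user.contains g))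
    "Radang Tenggorokan (Hindari makanan berminyak)" hasil
  let hasil := appendIf (["Nyeri otot", "Kelelahan", "Demam ringan"].all (fun g => gejala_user.contains g))
    "Kelelahan Fisik / Influenza Ringan" hasil
  hasil

def fallbackChecks (gejala_user : List String) (hasil : List String) : List String :=
  let hasil := appendIf (gejala_user.contains "Sesak napas")
    "Gangguan Pernapasan (Segera hubungi layanan kesehatan)" hasil
  let hasil := appendIf (gejala_user.contains "Demam tinggi")
    "Demam Tinggi (Gunakan kompres dingin dan paracetamol)" hasil
  let hasil := appendIf2 (gejala_user.contains "Sakit kepala") (gejala_user.contains "Kelelahan")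
    "Sakit Kepala Akibat Kelelahan / Stress" "Migrain atau Sakit Kepala Biasa" hasil
  let hasil := appendIf (gejala_user.contains "Nyeri otot")
    "Myalgia (Nyeri Otot) - Butuh relaksasi" hasil
  let hasil := appendIf (gejala_user.contains "Sakit tenggorokan")
    "Iritasi Tenggorokan / Gejala Awal Radang" hasil
  let hasil := appendIf (gejala_user.contains "Pilek")
    "Rhinitis / Pilek Biasa" hasil
  -- Python's odd guard: any("Sakit kepala" in gejala_user for g in ["Sakit kepala"])
  let hasil := appendIf (gejala_user.contains "Kelelahan" &&
      !(["Sakit kepala"].any (fun _g => gejala_user.contains "Sakit kepala")))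
    "Kelelahan Akut - Disarankan istirahat total" hasil
  let hasil := appendIf (gejala_user.contains "Demam ringan")
    "Gejala Meriang / Demam Ringan" hasil
  let hasil := appendIf (gejala_user.contains "Batuk kering")
    "Batuk Kering (Kemungkinan iritasi tenggorokan)" hasil
  hasil

def diagnosa (gejala_user : List String) : List String :=
  let hasil : List String := []
  let hasil := comboChecks gejala_user hasil
  let hasil := if hasil.isEmpty && !gejala_user.isEmpty then fallbackChecks gejala_user hasil else hasil
  let hasil := if hasil.isEmpty && !gejala_user.isEmpty then
      hasil ++ ["Gejala tidak spesifik. Hubungi tenaga medis untuk diagnosa lebih lanjut."]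
    else hasil
  hasil

-- ===== PORT B =====
-- B: declarative rule masks over a 9-symptom bitmask, a 512-entry table precomputed once,
-- and per call just one mask-building pass plus a table lookup (Source B's structure).
def symptoms : List String := ["Demam tinggi", "Batuk kering", "Sesak napas", "Sakit kepala",
  "Nyeri otot", "Pilek", "Sakit tenggorokan", "Demam ringan", "Kelelahan"]

-- _req: sum(1 << _SYMPTOMS.index(n) for n in names); every n used is in symptoms, so
-- List.idxOf equals Python's .index here.
def reqMask (names : List String) : Nat :=
  names.foldl (fun a n => a + (1 <<< (symptoms.idxOf n))) 0

def comboM : List (Nat × String) := [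
  (reqMask ["Demam tinggi", "Batuk kering", "Sesak napas"],
   "COVID-19 (Segera lakukan tes PCR dan isolasi mandiri)"),
  (reqMask ["Demam tinggi", "Sakit kepala", "Nyeri otot"],
   "Demam Berdarah (DBD) - Periksa kadar trombosit segera"),
  (reqMask ["Pilek", "Sakit tenggorokan", "Batuk kering"],
   "Flu / Influenza (Disarankan istirahat dan minum vitamin)"),
  (reqMask ["Sakit tenggorokan", "Demam ringan"],
   "Radang Tenggorokan (Hindari makanan berminyak)"),
  (reqMask ["Nyeri otot", "Kelelahan", "Demam ringan"],
   "Kelelahan Fisik / Influenza Ringan")]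

def fallbackM : List (Nat × Nat × String) := [
  (reqMask ["Sesak napas"], 0, "Gangguan Pernapasan (Segera hubungi layanan kesehatan)"),
  (reqMask ["Demam tinggi"], 0, "Demam Tinggi (Gunakan kompres dingin dan paracetamol)"),
  (reqMask ["Sakit kepala", "Kelelahan"], 0, "Sakit Kepala Akibat Kelelahan / Stress"),
  (reqMask ["Sakit kepala"], reqMask ["Kelelahan"], "Migrain atau Sakit Kepala Biasa"),
  (reqMask ["Nyeri otot"], 0, "Myalgia (Nyeri Otot) - Butuh relaksasi"),
  (reqMask ["Sakit tenggorokan"], 0, "Iritasi Tenggorokan / Gejala Awal Radang"),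
  (reqMask ["Pilek"], 0, "Rhinitis / Pilek Biasa"),
  (reqMask ["Kelelahan"], reqMask ["Sakit kepala"], "Kelelahan Akut - Disarankan istirahat total"),
  (reqMask ["Demam ringan"], 0, "Gejala Meriang / Demam Ringan"),
  (reqMask ["Batuk kering"], 0, "Batuk Kering (Kemungkinan iritasi tenggorokan)")]

def entry (mask : Nat) : List String :=
  let out := (comboM.filter (fun r => mask &&& r.1 == r.1)).map (fun r => r.2)
  let out := if out.isEmpty then
      (fallbackM.filter (fun r => (mask &&& r.1 == r.1) && (mask &&& r.2.1 == 0))).map (fun r => r.2.2)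
    else out
  if out.isEmpty then
    ["Gejala tidak spesifik. Hubungi tenaga medis untuk diagnosa lebih lanjut."]
  else out

def table : List (List String) := (List.range 512).map entry

def maskStep (m : Nat) (s : String) : Nat :=
  if symptoms.contains s then m ||| (1 <<< (symptoms.idxOf s)) else m

def maskOf (gejala_user : List String) : Nat := gejala_user.foldl maskStep 0

-- _TABLE[mask]: mask < 512 always (proved below), so the getD default is never used.
def diagnosa_alt (gejala_user : List String) : List String :=
  if gejala_user.isEmpty then []
  else table.getD (maskOf gejala_user) []

-- ===== PRECONDITION & SPEC =====
def Spec_diagnosa (gejala_user : List String) (out : List String) : Prop := out = diagnosa_alt gejala_user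
instance (gejala_user : List String) (out : List String) : Decidable (Spec_diagnosa gejala_user out) := by unfold Spec_diagnosa; infer_instance

-- ===== CLAIM (what is proved, stated in full; the proofs are below) =====
def Claim_equal_diagnosa : Prop := ∀ (gejala_user : List String), Dom_diagnosa gejala_user → Spec_diagnosa gejala_user (diagnosa gejala_user)

-- ===== LEMMAS AND PROOFS =====

-- single-symptom mask value of a list element
def vMask (s : String) : Nat :=
  if s = "Demam tinggi" then 1 else if s = "Batuk kering" then 2
  else if s = "Sesak napas" then 4 else if s = "Sakit kepala" then 8
  else if s = "Nyeri otot" then 16 else if s = "Pilek" then 32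
  else if s = "Sakit tenggorokan" then 64 else if s = "Demam ringan" then 128
  else if s = "Kelelahan" then 256 else 0

theorem maskStep_eq (m : Nat) (s : String) : maskStep m s = m ||| vMask s := by
  cases hc : symptoms.contains s with
  | true =>
    simp only [symptoms, List.contains_cons, List.contains_nil, Bool.or_eq_true,
      beq_iff_eq] at hc
    rcases hc with h|h|h|h|h|h|h|h|h|h
    all_goals (first | (subst h; rfl) | simp at h)
  | false =>
    simp only [symptoms, List.contains_cons, List.contains_nil, Bool.or_eq_false_iff,
      beq_eq_false_iff_ne, ne_eq] at hc
    obtain ⟨h0, h1, h2, h3, h4, h5, h6, h7, h8, -⟩ := hc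
    simp [maskStep, symptoms, vMask, h0, h1, h2, h3, h4, h5, h6, h7, h8]

theorem vMask_lt (s : String) : vMask s < 512 := by
  unfold vMask; split_ifs <;> decide

theorem bitFold (g : List String) (m : Nat) (i : Nat) :
    (g.foldl maskStep m).testBit i = (m.testBit i || g.any (fun s => (vMask s).testBit i)) := by
  induction g generalizing m with
  | nil => simp
  | cons s t ih =>
    simp [List.foldl_cons, ih, maskStep_eq, Nat.testBit_or, Bool.or_assoc]

theorem foldLt (g : List String) (m : Nat) (hm : m < 512) : g.foldl maskStep m < 512 := by
  induction g generalizing m with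
  | nil => exact hm
  | cons s t ih =>
    refine ih _ ?_
    rw [maskStep_eq]
    have h2 : (512 : Nat) = 2 ^ 9 := by norm_num
    rw [h2] at hm ⊢
    exact Nat.or_lt_two_pow hm (h2 ▸ vMask_lt s)

theorem maskOf_lt (g : List String) : maskOf g < 512 := foldLt g 0 (by decide)

theorem vBit (s : String) :
    ((vMask s).testBit 0 = (s == "Demam tinggi")) ∧
    ((vMask s).testBit 1 = (s == "Batuk kering")) ∧
    ((vMask s).testBit 2 = (s == "Sesak napas")) ∧
    ((vMask s).testBit 3 = (s == "Sakit kepala")) ∧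
    ((vMask s).testBit 4 = (s == "Nyeri otot")) ∧
    ((vMask s).testBit 5 = (s == "Pilek")) ∧
    ((vMask s).testBit 6 = (s == "Sakit tenggorokan")) ∧
    ((vMask s).testBit 7 = (s == "Demam ringan")) ∧
    ((vMask s).testBit 8 = (s == "Kelelahan")) := by
  unfold vMask
  split_ifs with h0 h1 h2 h3 h4 h5 h6 h7 h8 <;>
    first
      | (subst_vars; exact ⟨rfl, rfl, rfl, rfl, rfl, rfl, rfl, rfl, rfl⟩)
      | simp [h0, h1, h2, h3, h4, h5, h6, h7, h8]

theorem maskBit (g : List String) (i : Nat) (x : String)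
    (hx : ∀ s : String, (vMask s).testBit i = (s == x)) :
    (maskOf g).testBit i = g.contains x := by
  rw [maskOf, bitFold]
  simp only [Nat.zero_testBit, Bool.false_or]
  simp only [hx]
  exact List.any_beq' ..

-- A's rule chain as a pure function of the nine membership booleans and the
-- non-emptiness flag (definitionally equal to diagnosa's body).
def aExpr (b0 b1 b2 b3 b4 b5 b6 b7 b8 e : Bool) : List String :=
  let hasil : List String := []
  let hasil := appendIf (b0 && (b1 && (b2 && true)))
    "COVID-19 (Segera lakukan tes PCR dan isolasi mandiri)" hasil
  let hasil := appendIf (b0 && (b3 && (b4 && true)))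
    "Demam Berdarah (DBD) - Periksa kadar trombosit segera" hasil
  let hasil := appendIf (b5 && (b6 && (b1 && true)))
    "Flu / Influenza (Disarankan istirahat dan minum vitamin)" hasil
  let hasil := appendIf (b6 && (b7 && true))
    "Radang Tenggorokan (Hindari makanan berminyak)" hasil
  let hasil := appendIf (b4 && (b8 && (b7 && true)))
    "Kelelahan Fisik / Influenza Ringan" hasil
  let hasil := if hasil.isEmpty && e then
      let hasil := appendIf b2 "Gangguan Pernapasan (Segera hubungi layanan kesehatan)" hasil
      let hasil := appendIf b0 "Demam Tinggi (Gunakan kompres dingin dan paracetamol)" hasil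
      let hasil := appendIf2 b3 b8
        "Sakit Kepala Akibat Kelelahan / Stress" "Migrain atau Sakit Kepala Biasa" hasil
      let hasil := appendIf b4 "Myalgia (Nyeri Otot) - Butuh relaksasi" hasil
      let hasil := appendIf b6 "Iritasi Tenggorokan / Gejala Awal Radang" hasil
      let hasil := appendIf b5 "Rhinitis / Pilek Biasa" hasil
      let hasil := appendIf (b8 && !(b3 || false)) "Kelelahan Akut - Disarankan istirahat total" hasil
      let hasil := appendIf b7 "Gejala Meriang / Demam Ringan" hasil
      let hasil := appendIf b1 "Batuk Kering (Kemungkinan iritasi tenggorokan)" hasil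
      hasil
    else hasil
  if hasil.isEmpty && e then
    hasil ++ ["Gejala tidak spesifik. Hubungi tenaga medis untuk diagnosa lebih lanjut."]
  else hasil

theorem diagnosa_eq_aExpr (g : List String) :
    diagnosa g = aExpr (g.contains "Demam tinggi") (g.contains "Batuk kering")
      (g.contains "Sesak napas") (g.contains "Sakit kepala") (g.contains "Nyeri otot")
      (g.contains "Pilek") (g.contains "Sakit tenggorokan") (g.contains "Demam ringan")
      (g.contains "Kelelahan") (!g.isEmpty) := by
  rfl

set_option maxRecDepth 100000 in
theorem master : ∀ n < 512,
    aExpr (n.testBit 0) (n.testBit 1) (n.testBit 2) (n.testBit 3) (n.testBit 4)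
      (n.testBit 5) (n.testBit 6) (n.testBit 7) (n.testBit 8) true = entry n := by
  decide

theorem table_getD (m : Nat) (hm : m < 512) : table.getD m [] = entry m := by
  rw [table, List.getD_eq_getElem?_getD, List.getElem?_map, List.getElem?_range hm]; rfl

-- ===== VERDICT (by name: the statement is the Claim_ definition above) =====
theorem diagnosa_spec : Claim_equal_diagnosa := by
  intro g _
  show diagnosa g = diagnosa_alt g
  cases g with
  | nil => rfl
  | cons a t =>
    rw [diagnosa_eq_aExpr]
    rw [← maskBit (a :: t) 0 "Demam tinggi" (fun s => (vBit s).1),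
        ← maskBit (a :: t) 1 "Batuk kering" (fun s => (vBit s).2.1),
        ← maskBit (a :: t) 2 "Sesak napas" (fun s => (vBit s).2.2.1),
        ← maskBit (a :: t) 3 "Sakit kepala" (fun s => (vBit s).2.2.2.1),
        ← maskBit (a :: t) 4 "Nyeri otot" (fun s => (vBit s).2.2.2.2.1),
        ← maskBit (a :: t) 5 "Pilek" (fun s => (vBit s).2.2.2.2.2.1),
        ← maskBit (a :: t) 6 "Sakit tenggorokan" (fun s => (vBit s).2.2.2.2.2.2.1),
        ← maskBit (a :: t) 7 "Demam ringan" (fun s => (vBit s).2.2.2.2.2.2.2.1),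
        ← maskBit (a :: t) 8 "Kelelahan" (fun s => (vBit s).2.2.2.2.2.2.2.2)]
    have he : (!(a :: t).isEmpty) = true := rfl
    rw [he, master (maskOf (a :: t)) (maskOf_lt _)]
    have hd : diagnosa_alt (a :: t) = table.getD (maskOf (a :: t)) [] := rfl
    rw [hd, table_getD _ (maskOf_lt (a :: t))]
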